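-- pv_equiv track=rewrite | github.com/sukilsiva/competitve_coding | Books_Distribution.py | solution
-- ===== SOURCE A (Python) =====
-- def solution(n, arr):
--     ### Find the Max number in a arr
--     ### in our case its 5
--     max_sum = max(arr)
--     ### find what each element in array needed to have here its 2 [2,2,2]
--     each_element_value = sum(arr)//len(arr)
--     ### Note the index of person having highest no of books
--     idx = arr.index(max_sum)
--     ### form two arrays left side highest element and right side of highest element
--     ### Eg. if 4 persons are there having following respective books 1 1 5 1
--     ### then splitting as follows
--     ### left side [1,1,4] and right side [3,1]
--     ### count actual no of books needed
--     ### Eg. left side of 5 [1,1] 2 needed so it can be calculated by len of left side * 2 - each_element need to have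
--     left_side_actual = len(arr[0:idx])*each_element_value
--     right_side_actual = len(arr[idx+1:n])*each_element_value
--     ### Forming the arra left side and right side [1,1] and [1]
--     left_side_arr = arr[0:idx]
--     right_side_arr = arr[idx+1:n]
--     ### Finding the sum for both sides 2 for left side and 1 for right side
--     left_side_sum = sum(left_side_arr)
--     right_side_sum = sum(right_side_arr)
--     ### From below step we can find the needed
--     left_side_needed = left_side_actual - left_side_sum
--     right_side_needed = right_side_actual - right_side_sum
--     left_side_arr.append(each_element_value + left_side_needed)
--     right_side_arr.insert(0, each_element_value + right_side_needed)
--     left_side_arr = left_side_arr[::-1]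
--     i,j =0,0
--     l_count, r_count = 0,0
--     ### from the highest books person find out the diff between books they are having
--     ### and actual no of books they can have and add diff to count
--     ### for left side we will get 3 and right side 1 in above explained scenario
--     while i<len(left_side_arr):
--         diff_1 = left_side_arr[i] - each_element_value
--         if diff_1 == 0:
--             pass
--         else:
--             left_side_arr[i+1] += diff_1
--         l_count += diff_1
--         i+=1
--     while j<len(right_side_arr):
--         diff_2 = right_side_arr[j] - each_element_value
--         if diff_2 == 0:
--             pass
--         else:
--             right_side_arr[j+1] += diff_2
--         r_count += diff_2
--         j+=1
--     ### add the final count and return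
--     return l_count + r_count
-- ===== SOURCE B (Python) =====
-- def solution(n, arr):
--     each = sum(arr) // len(arr)
--     idx = arr.index(max(arr))
--     left = arr[0:idx]
--     right = arr[idx+1:n]
--     total = 0
--     w = len(left)
--     for v in left:
--         total += (each - v) * w
--         w -= 1
--     w = 1
--     for v in right:
--         total += (each - v) * w
--         w += 1
--     return total
-- ===== Notes on version B (the rewrite author's own statement) =====
-- stated objective: simpler
-- what changed: B replaces A's fake-element construction, list mutation with carry propagation and reversal by two plain weight-carrying passes over the untouched left and right slices, summing (avg - v) * distance directly.
import Mathlib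
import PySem

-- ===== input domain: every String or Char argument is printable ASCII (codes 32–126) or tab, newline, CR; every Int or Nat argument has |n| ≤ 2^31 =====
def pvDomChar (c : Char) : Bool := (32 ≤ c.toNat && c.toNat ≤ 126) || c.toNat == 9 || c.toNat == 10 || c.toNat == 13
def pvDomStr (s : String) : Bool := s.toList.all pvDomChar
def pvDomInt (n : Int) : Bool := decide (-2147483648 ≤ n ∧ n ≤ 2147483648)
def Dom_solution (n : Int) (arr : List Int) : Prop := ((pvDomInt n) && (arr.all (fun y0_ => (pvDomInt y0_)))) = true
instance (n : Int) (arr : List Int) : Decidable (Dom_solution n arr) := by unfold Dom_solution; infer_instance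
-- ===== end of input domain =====

-- B computes the same count with two plain weight-carrying passes over the untouched
-- side slices instead of A's fake-element append/insert, in-place carry propagation
-- and reversal (objective: simpler).

-- ===== PORT A =====
-- A's while loop: index i over l, diff = l[i] - each, carry added into l[i+1]
-- (the `if diff == 0: pass` branch kept; `l.set` out of range is the identity, which is
-- only reached where Python's guard makes the write dead — exact on Pre_-admitted inputs,
-- where the final diff is always 0, so Python never indexes out of range either)
def solutionLoop (l : List Int) (i : Nat) (count each : Int) : Int :=
  if h : i < l.length then
    solutionLoop
      (if l.getD i 0 - each = 0 then l
       else l.set (i+1) (l.getD (i+1) 0 + (l.getD i 0 - each)))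
      (i+1) (count + (l.getD i 0 - each)) each
  else count
termination_by l.length - i
decreasing_by
  split
  · omega
  · simp only [List.length_set]; omega

def solution (n : Int) (arr : List Int) : Int :=
  let max_sum := (PySem.List.max? arr (fun y => y)).getD 0            -- max(arr); Pre_ excludes []
  let each_element_value := PySem.Int.floordiv arr.sum arr.length
  let idx := ((PySem.List.index? arr max_sum).getD 0 : Int)  -- arr.index(max_sum)
  let left_side_actual := ((PySem.List.slice arr (some 0) (some idx)).length : Int) * each_element_value
  let right_side_actual := ((PySem.List.slice arr (some (idx+1)) (some n)).length : Int) * each_element_value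
  let left_side_arr := PySem.List.slice arr (some 0) (some idx)
  let right_side_arr := PySem.List.slice arr (some (idx+1)) (some n)
  let left_side_sum := left_side_arr.sum
  let right_side_sum := right_side_arr.sum
  let left_side_needed := left_side_actual - left_side_sum
  let right_side_needed := right_side_actual - right_side_sum
  let left_side_arr := left_side_arr ++ [each_element_value + left_side_needed]   -- .append
  let right_side_arr := PySem.List.insert right_side_arr 0 (each_element_value + right_side_needed)
  let left_side_arr := ((PySem.List.slice? left_side_arr none none (-1)).getD [])  -- [::-1]
  let l_count := solutionLoop left_side_arr 0 0 each_element_value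
  let r_count := solutionLoop right_side_arr 0 0 each_element_value
  l_count + r_count

-- ===== PORT B =====
-- `for v in left: total += (each - v) * w; w -= 1`
def solutionAltLoopL (xs : List Int) (each w total : Int) : Int :=
  match xs with
  | [] => total
  | v :: rest => solutionAltLoopL rest each (w - 1) (total + (each - v) * w)

-- `for v in right: total += (each - v) * w; w += 1`
def solutionAltLoopR (xs : List Int) (each w total : Int) : Int :=
  match xs with
  | [] => total
  | v :: rest => solutionAltLoopR rest each (w + 1) (total + (each - v) * w)

def solution_alt (n : Int) (arr : List Int) : Int :=
  let each := PySem.Int.floordiv arr.sum arr.length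
  let idx := (((PySem.List.index? arr ((PySem.List.max? arr (fun y => y)).getD 0)).getD 0 : Nat) : Int)
  let left := PySem.List.slice arr (some 0) (some idx)
  let right := PySem.List.slice arr (some (idx+1)) (some n)
  let total := solutionAltLoopL left each (left.length : Int) 0
  solutionAltLoopR right each 1 total

-- ===== PRECONDITION & SPEC =====
-- Pre_ excludes only the empty list, on which Python A raises ValueError (max of empty sequence).
def Pre_solution (n : Int) (arr : List Int) : Prop := arr ≠ []
instance (n : Int) (arr : List Int) : Decidable (Pre_solution n arr) := by unfold Pre_solution; infer_instance
def pvWitness_solution : Int × List Int := (4, [1, 1, 5, 1])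

def Spec_solution (n : Int) (arr : List Int) (out : Int) : Prop := out = solution_alt n arr
instance (n : Int) (arr : List Int) (out : Int) : Decidable (Spec_solution n arr out) := by unfold Spec_solution; infer_instance

-- ===== CLAIM (what is proved, stated in full; the proofs are below) =====
def Claim_equal_solution : Prop := ∀ (n : Int) (arr : List Int), Dom_solution n arr → Pre_solution n arr → Spec_solution n arr (solution n arr)

-- ===== LEMMAS AND PROOFS =====

-- F xs e = Σ_j (e - xs[j]) * (xs.length - j): the canonical weighted sum both sides reduce to.
def pvF (xs : List Int) (e : Int) : Int :=
  match xs with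
  | [] => 0
  | x :: rest => (e - x) * ((rest.length : Int) + 1) + pvF rest e

-- carry-form of A's while loop
def pvLoop2 (xs : List Int) (carry count e : Int) : Int :=
  match xs with
  | [] => count
  | x :: rest => pvLoop2 rest (x + carry - e) (count + (x + carry - e)) e

lemma pvLoop2_set_head (xs : List Int) (carry count e : Int) :
    pvLoop2 (xs.set 0 (xs.getD 0 0 + carry)) 0 count e = pvLoop2 xs carry count e := by
  cases xs with
  | nil => simp [pvLoop2]
  | cons x rest =>
    simp only [List.set, List.getD_cons_zero, pvLoop2]
    ring_nf

lemma solutionLoop_eq_pvLoop2 (k : Nat) : ∀ (l : List Int) (i : Nat) (c e : Int),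
    l.length - i = k → solutionLoop l i c e = pvLoop2 (l.drop i) 0 c e := by
  induction k with
  | zero =>
    intro l i c e hk
    have hi : ¬ i < l.length := by omega
    rw [solutionLoop.eq_def, dif_neg hi, List.drop_eq_nil_of_le (by omega : l.length ≤ i)]
    rfl
  | succ m ih =>
    intro l i c e hk
    have hi : i < l.length := by omega
    rw [solutionLoop.eq_def, dif_pos hi]
    set d := l.getD i 0 - e with hd
    set l' := if d = 0 then l else l.set (i+1) (l.getD (i+1) 0 + d) with hl'
    have hlen' : l'.length = l.length := by
      rw [hl']; split <;> simp
    rw [ih l' (i+1) (c + d) e (by omega)]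
    have hdropi : l.drop i = l[i] :: l.drop (i+1) := List.drop_eq_getElem_cons hi
    have hget : l.getD i 0 = l[i] := List.getD_eq_getElem l 0 hi
    have hstep : pvLoop2 (l.drop i) 0 c e = pvLoop2 (l.drop (i+1)) d (c + d) e := by
      rw [hdropi, pvLoop2, hd, hget]; ring_nf
    rw [hstep]
    by_cases hz : d = 0
    · rw [hl', if_pos hz, hz]
    · rw [hl', if_neg hz]
      by_cases hi1 : i + 1 < l.length
      · have h0 : 0 < (l.drop (i+1)).length := by simp; omega
        have hdrop' : (l.set (i+1) (l.getD (i+1) 0 + d)).drop (i+1)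
            = (l.drop (i+1)).set 0 ((l.drop (i+1)).getD 0 0 + d) := by
          rw [List.drop_set]
          simp
        rw [hdrop', pvLoop2_set_head]
      · have hnil : l.drop (i+1) = [] := List.drop_eq_nil_of_le (by omega)
        have hnil' : (l.set (i+1) (l.getD (i+1) 0 + d)).drop (i+1) = [] :=
          List.drop_eq_nil_of_le (by simp; omega)
        rw [hnil, hnil', pvLoop2, pvLoop2]

lemma pvLoop2_eq_pvF (xs : List Int) : ∀ (carry count e : Int),
    pvLoop2 xs carry count e = count - pvF xs e + (xs.length : Int) * carry := by
  induction xs with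
  | nil => intro carry count e; simp [pvLoop2, pvF]
  | cons x rest ih =>
    intro carry count e
    rw [pvLoop2, ih, pvF]
    simp only [List.length_cons]
    push_cast
    ring

lemma pvF_append_singleton (xs : List Int) (x e : Int) :
    pvF (xs ++ [x]) e = pvF xs e + ((xs.length : Int) * e - xs.sum) + (e - x) := by
  induction xs with
  | nil => simp [pvF]
  | cons y rest ih =>
    simp only [List.cons_append, pvF, ih]
    push_cast
    simp [List.sum_cons]
    ring

-- weights (len - j) + (j + 1) = len + 1, summed
lemma pvF_add_pvF_reverse (xs : List Int) (e : Int) :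
    pvF xs e + pvF xs.reverse e = ((xs.length : Int) + 1) * ((xs.length : Int) * e - xs.sum) := by
  induction xs with
  | nil => simp [pvF]
  | cons x rest ih =>
    rw [List.reverse_cons, pvF_append_singleton, pvF]
    simp only [List.length_reverse, List.sum_reverse, List.length_cons, List.sum_cons]
    push_cast
    nlinarith [ih]

lemma solutionAltLoopL_eq (xs : List Int) : ∀ (e w total : Int),
    solutionAltLoopL xs e w total
      = total + pvF xs e + (w - (xs.length : Int)) * ((xs.length : Int) * e - xs.sum) := by
  induction xs with
  | nil => intro e w total; simp [solutionAltLoopL, pvF]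
  | cons x rest ih =>
    intro e w total
    rw [solutionAltLoopL, ih, pvF]
    simp only [List.length_cons, List.sum_cons]
    push_cast
    ring

-- weights (j + w) + (len - j) = len + w, summed
lemma solutionAltLoopR_add_pvF (xs : List Int) : ∀ (e w total : Int),
    solutionAltLoopR xs e w total + pvF xs e
      = total + ((xs.length : Int) + w) * ((xs.length : Int) * e - xs.sum) := by
  induction xs with
  | nil => intro e w total; simp [solutionAltLoopR, pvF]
  | cons x rest ih =>
    intro e w total
    rw [solutionAltLoopR, pvF]
    have := ih e (w + 1) (total + (e - x) * w)
    simp only [List.length_cons, List.sum_cons]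
    push_cast
    push_cast at this
    linarith [this]

-- A's per-side count on the prepared list (fake :: ys)
lemma solutionLoop_closed (ys : List Int) (e need : Int) :
    solutionLoop ((e + need) :: ys) 0 0 e = -pvF ((e + need) :: ys) e := by
  rw [solutionLoop_eq_pvLoop2 ((e + need) :: ys).length _ 0 0 e (by simp)]
  simp only [List.drop_zero]
  rw [pvLoop2_eq_pvF]
  ring

-- ===== VERDICT (by name: the statement is the Claim_ definition above) =====
theorem solution_spec : Claim_equal_solution := by
  intro n arr _hdom _hpre
  unfold Spec_solution solution solution_alt
  dsimp only
  set e := PySem.Int.floordiv arr.sum arr.length with he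
  set idx := (((PySem.List.index? arr ((PySem.List.max? arr (fun y => y)).getD 0)).getD 0 : Nat) : Int) with hidx
  set p := PySem.List.slice arr (some 0) (some idx) with hp
  set r := PySem.List.slice arr (some (idx+1)) (some n) with hr
  rw [PySem.List.insert_zero, PySem.List.slice?_none_none_neg_one]
  simp only [Option.getD_some, List.reverse_append, List.reverse_cons, List.reverse_nil,
    List.nil_append, List.cons_append]
  rw [solutionLoop_closed p.reverse e ((p.length : Int) * e - p.sum),
      solutionLoop_closed r e ((r.length : Int) * e - r.sum)]
  rw [solutionAltLoopL_eq]
  have hR := solutionAltLoopR_add_pvF r e 1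
      (0 + pvF p e + ((p.length : Int) - (p.length : Int)) * ((p.length : Int) * e - p.sum))
  have hL := pvF_add_pvF_reverse p e
  simp only [pvF, List.length_reverse]
  linarith [hR, hL]
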